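-- pv_equiv track=rewrite | github.com/pauleway/Advent-Of-Code-2023 | day_3.py | collect_ranges
-- ===== SOURCE A (Python) =====
-- def collect_ranges(data):
--     # Collect ranges
--     ranges = []
--     first_x = -1
--     last_x = -1
--     for row in range(len(data)):
--         for col in range(len(data[0])):
--             if data[row][col] in "1234567890":
--                 if first_x == -1:
--                     first_x = col
--             else:
--                 if first_x != -1 or col == len(data[0]):
--                     last_x = col
--                     ranges.append((row, (first_x, last_x)))
--                     first_x = -1
--                     last_x = -1
--         if first_x != -1:
--             last_x = len(data[0])
--             ranges.append((row, (first_x, last_x)))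
--             first_x = -1
--             last_x = -1
--     return ranges
-- ===== SOURCE B (Python) =====
-- def collect_ranges(data):
--     # Two-pointer run scanner per row (instead of a per-cell first_x/last_x state machine)
--     ranges = []
--     for r in range(len(data)):
--         row = data[r]
--         w = len(data[0])
--         i = 0
--         while i < w:
--             if row[i] in "0123456789":
--                 j = i
--                 while j < w and row[j] in "0123456789":
--                     j += 1
--                 ranges.append((r, (i, j)))
--                 i = j
--             else:
--                 i += 1
--     return ranges
-- ===== Notes on version B (the rewrite author's own statement) =====
-- stated objective: alternative
-- what changed: Replaces A's per-cell state machine (first_x/last_x sentinels carried across every cell plus an end-of-row flush) with a per-row two-pointer scanner that finds each digit run's start and jumps straight to its end.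
import Mathlib
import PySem

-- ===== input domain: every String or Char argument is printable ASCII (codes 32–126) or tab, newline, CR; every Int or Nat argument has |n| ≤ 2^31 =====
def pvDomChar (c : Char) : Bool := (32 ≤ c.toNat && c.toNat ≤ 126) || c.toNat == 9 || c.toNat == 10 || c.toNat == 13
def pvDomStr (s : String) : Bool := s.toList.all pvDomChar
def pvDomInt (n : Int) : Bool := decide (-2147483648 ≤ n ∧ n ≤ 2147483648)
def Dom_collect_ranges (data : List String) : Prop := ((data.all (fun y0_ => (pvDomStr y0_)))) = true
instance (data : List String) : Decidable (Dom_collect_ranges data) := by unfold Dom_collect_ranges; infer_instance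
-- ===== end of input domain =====

-- B replaces A's per-cell first_x/last_x state machine with a per-row two-pointer run scanner (alternative decomposition, same cost).
-- ===== PORT A =====
-- membership test  data[row][col] in "1234567890"  (single char, so substring test = char membership)
def pvDig (c : Char) : Bool := "1234567890".toList.contains c

-- one cell of A's inner loop; out-of-range chars read as ' ' (Pre_ excludes those inputs: Python raises IndexError there)
def pvStepA (r w : Int) (cs : List Char) (st : List (Int × (Int × Int)) × Int × Int) (col : Int) :
    List (Int × (Int × Int)) × Int × Int :=
  match st with
  | (ranges, fx, lx) =>
    if pvDig ((PySem.Chars.pyGet? cs col).getD ' ') then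
      if fx = -1 then (ranges, col, lx) else (ranges, fx, lx)
    else
      if fx ≠ -1 ∨ col = w then (ranges ++ [(r, (fx, col))], -1, -1) else (ranges, fx, lx)

-- A's end-of-row flush: if first_x != -1 then last_x = len(data[0]); append
def pvFlushA (r w : Int) (st : List (Int × (Int × Int)) × Int × Int) :
    List (Int × (Int × Int)) × Int × Int :=
  match st with
  | (ranges, fx, _) => if fx ≠ -1 then (ranges ++ [(r, (fx, w))], -1, -1) else st

def pvRowA (data : List String) (w : Int) (st : List (Int × (Int × Int)) × Int × Int) (r : Int) :
    List (Int × (Int × Int)) × Int × Int :=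
  let cs := ((PySem.List.pyGet? data r).getD "").toList
  pvFlushA r w ((PySem.List.pyRange 0 w 1).foldl (pvStepA r w cs) st)

def collect_ranges (data : List String) : List (Int × (Int × Int)) :=
  let w : Int := PySem.Str.len ((PySem.List.pyGet? data 0).getD "")
  ((PySem.List.pyRange 0 (data.length : Int) 1).foldl (pvRowA data w) ([], -1, -1)).1

-- ===== PORT B =====
-- inner while:  j advances while j < w and row[j] is a digit
def pvRunEnd (cs : List Char) (w : Nat) (j : Nat) : Nat :=
  if j < w ∧ pvDig (cs.getD j ' ') then pvRunEnd cs w (j + 1) else j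
termination_by w - j
decreasing_by omega

theorem pvRunEnd_ge (cs : List Char) (w j : Nat) : j ≤ pvRunEnd cs w j := by
  rw [pvRunEnd]
  split
  · exact le_trans (Nat.le_succ j) (pvRunEnd_ge cs w (j + 1))
  · exact le_refl j
termination_by w - j
decreasing_by omega

theorem pvRunEnd_gt (cs : List Char) (w i : Nat) (h : i < w) (hd : pvDig (cs.getD i ' ') = true) :
    i < pvRunEnd cs w i := by
  rw [pvRunEnd]
  simp only [h, hd, and_self, if_true]
  exact Nat.lt_of_lt_of_le (Nat.lt_succ_self i) (pvRunEnd_ge cs w (i + 1))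

-- outer while of B's per-row scan
def pvScanRow (r : Int) (cs : List Char) (w : Nat) (i : Nat) : List (Int × (Int × Int)) :=
  if h : i < w then
    if hd : pvDig (cs.getD i ' ') then
      let j := pvRunEnd cs w i
      (r, ((i : Int), (j : Int))) :: pvScanRow r cs w j
    else
      pvScanRow r cs w (i + 1)
  else []
termination_by w - i
decreasing_by
  · have := pvRunEnd_gt cs w i h hd; omega
  · omega

def collect_ranges_alt (data : List String) : List (Int × (Int × Int)) :=
  let w : Nat := ((PySem.List.pyGet? data 0).getD "").toList.length
  (PySem.List.pyRange 0 (data.length : Int) 1).foldl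
    (fun ranges r => ranges ++ pvScanRow r ((PySem.List.pyGet? data r).getD "").toList w 0) []

-- ===== PRECONDITION & SPEC =====
-- Pre_ excludes ragged grids with a row shorter than the first row: there Python A (and Python B)
-- raises IndexError while indexing that row, so no value is claimed.
def Pre_collect_ranges (data : List String) : Prop :=
  ∀ s ∈ data, (data.headD "").toList.length ≤ s.toList.length
instance (data : List String) : Decidable (Pre_collect_ranges data) := by
  unfold Pre_collect_ranges; infer_instance

def pvWitness_collect_ranges : List String := ["12.4", ".5..", "....", "9999"]

def Spec_collect_ranges (data : List String) (out : List (Int × (Int × Int))) : Prop := out = collect_ranges_alt data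
instance (data : List String) (out : List (Int × (Int × Int))) : Decidable (Spec_collect_ranges data out) := by unfold Spec_collect_ranges; infer_instance

-- ===== CLAIM (what is proved, stated in full; the proofs are below) =====
def Claim_equal_collect_ranges : Prop := ∀ (data : List String), Dom_collect_ranges data → Pre_collect_ranges data → Spec_collect_ranges data (collect_ranges data)

-- ===== LEMMAS AND PROOFS =====

-- A reads characters with an Int index, B with a Nat index; same character.
theorem pvGetAt (cs : List Char) (i : Nat) :
    (PySem.Chars.pyGet? cs (i : Int)).getD ' ' = cs[i]?.getD ' ' := by
  simp [pysem]

-- Core per-row lemma: A's column fold + flush, started not-in-run (resp. in a run begun at fx),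
-- produces exactly B's run list from column i (resp. the pending run closed at pvRunEnd, then B's list).
theorem pvCore (r : Int) (cs : List Char) (w : Nat) (i : Nat) (hi : i ≤ w) :
    (∀ ranges,
      pvFlushA r (w : Int) ((PySem.List.pyRange (i : Int) (w : Int) 1).foldl (pvStepA r (w : Int) cs) (ranges, -1, -1))
        = (ranges ++ pvScanRow r cs w i, -1, -1))
    ∧ (∀ ranges fx lx, fx ≠ -1 →
      pvFlushA r (w : Int) ((PySem.List.pyRange (i : Int) (w : Int) 1).foldl (pvStepA r (w : Int) cs) (ranges, fx, lx))
        = (ranges ++ (r, (fx, (pvRunEnd cs w i : Int))) :: pvScanRow r cs w (pvRunEnd cs w i), -1, -1)) := by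
  by_cases hlt : i < w
  · have IH := pvCore r cs w (i + 1) (by omega)
    have hcons : PySem.List.pyRange (i : Int) (w : Int) 1
        = (i : Int) :: PySem.List.pyRange ((i + 1 : Nat) : Int) (w : Int) 1 := by
      rw [PySem.List.pyRange_one_cons (by exact_mod_cast hlt)]
      norm_num
    have hne : ((i : Int)) ≠ ((w : Int)) := by exact_mod_cast Nat.ne_of_lt hlt
    by_cases hd : pvDig (cs[i]?.getD ' ') = true
    · -- digit at column i
      have hrE : pvRunEnd cs w i = pvRunEnd cs w (i + 1) := by
        rw [pvRunEnd]
        simp only [List.getD_eq_getElem?_getD, hlt, hd, and_self, if_true]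
      have hscan : pvScanRow r cs w i
          = (r, ((i : Int), (pvRunEnd cs w i : Int))) :: pvScanRow r cs w (pvRunEnd cs w i) := by
        rw [pvScanRow]
        simp only [List.getD_eq_getElem?_getD, hlt, hd, dif_pos]
      constructor
      · intro ranges
        rw [hcons]
        simp only [List.foldl_cons, pvStepA, pvGetAt, hd, if_true]
        rw [IH.2 ranges (i : Int) (-1) (by omega), hscan, hrE]
      · intro ranges fx lx hfx
        rw [hcons]
        simp only [List.foldl_cons, pvStepA, pvGetAt, hd, if_true, if_neg hfx]
        rw [IH.2 ranges fx lx hfx, hrE]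
    · -- non-digit at column i
      have hscan : pvScanRow r cs w i = pvScanRow r cs w (i + 1) := by
        rw [pvScanRow]
        simp [hlt, hd]
      have hrE : pvRunEnd cs w i = i := by
        rw [pvRunEnd]
        simp [hd]
      constructor
      · intro ranges
        rw [hcons]
        simp only [List.foldl_cons, pvStepA, pvGetAt, hd, Bool.false_eq_true, if_false,
          ne_eq, not_true, false_or, if_neg hne]
        rw [IH.1 ranges, hscan]
      · intro ranges fx lx hfx
        rw [hcons]
        simp only [List.foldl_cons, pvStepA, pvGetAt, hd, Bool.false_eq_true, if_false,
          ne_eq, hfx, not_false_iff, true_or, if_true]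
        rw [IH.1 (ranges ++ [(r, (fx, (i : Int)))]), hrE, ← hscan]
        simp
  · -- i = w : empty column range
    have hiw : i = w := by omega
    subst hiw
    have hnil : PySem.List.pyRange (i : Int) (i : Int) 1 = [] :=
      PySem.List.pyRange_one_eq_nil le_rfl
    have hrE : pvRunEnd cs i i = i := by rw [pvRunEnd]; simp
    have hscan : pvScanRow r cs i i = [] := by rw [pvScanRow]; simp
    constructor
    · intro ranges
      rw [hnil]
      simp [pvFlushA, hscan]
    · intro ranges fx lx hfx
      rw [hnil]
      simp [pvFlushA, hfx, hrE, hscan]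
termination_by w - i
decreasing_by all_goals omega

theorem pvRows (data : List String) (w : Nat) (l : List Int) :
    ∀ ranges, l.foldl (pvRowA data (w : Int)) (ranges, -1, -1)
      = (l.foldl (fun ranges r => ranges ++ pvScanRow r ((PySem.List.pyGet? data r).getD "").toList w 0) ranges, -1, -1) := by
  induction l with
  | nil => intro ranges; rfl
  | cons r l ih =>
    intro ranges
    have h := (pvCore r ((PySem.List.pyGet? data r).getD "").toList w 0 (Nat.zero_le w)).1 ranges
    push_cast at h
    simp only [List.foldl_cons, pvRowA, h, ih]

-- ===== VERDICT (by name: the statement is the Claim_ definition above) =====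
theorem collect_ranges_spec : Claim_equal_collect_ranges := by
  intro data _ _
  unfold Spec_collect_ranges collect_ranges collect_ranges_alt
  have hw : PySem.Str.len ((PySem.List.pyGet? data 0).getD "")
      = ((((PySem.List.pyGet? data 0).getD "").toList.length : Nat) : Int) := by
    simp
  rw [hw]
  exact congrArg Prod.fst
    (pvRows data (((PySem.List.pyGet? data 0).getD "").toList.length)
      (PySem.List.pyRange 0 (data.length : Int) 1) [])
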